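-- pv_equiv track=rewrite | github.com/portnoyslp/advent-of-code | 2015/day8.py | count_encode
-- ===== SOURCE A (Python) =====
-- def count_encode(x):
--     code_chars = 0
--     str_chars = 0
--     while len(x) != 0:
--         inc = (0,0)
--         if x[0] == '"' or x[0] == '\\':
--             code_chars += 2
--         else:
--             code_chars += 1
--         str_chars +=1
--         x = x[1:]
--     # add two for surrounding double quotes
--     return code_chars + 2, str_chars
-- ===== SOURCE B (Python) =====
-- def count_encode(x):
--     # closed form: each char is 1 code char, quotes/backslashes cost 1 extra, +2 surrounding quotes
--     return len(x) + x.count('"') + x.count('\\') + 2, len(x)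
-- ===== Notes on version B (the rewrite author's own statement) =====
-- stated objective: idiomatic
-- what changed: Replaced the character-by-character while loop with two accumulators by a closed-form arithmetic expression over len(x) and two character counts.
import Mathlib
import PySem

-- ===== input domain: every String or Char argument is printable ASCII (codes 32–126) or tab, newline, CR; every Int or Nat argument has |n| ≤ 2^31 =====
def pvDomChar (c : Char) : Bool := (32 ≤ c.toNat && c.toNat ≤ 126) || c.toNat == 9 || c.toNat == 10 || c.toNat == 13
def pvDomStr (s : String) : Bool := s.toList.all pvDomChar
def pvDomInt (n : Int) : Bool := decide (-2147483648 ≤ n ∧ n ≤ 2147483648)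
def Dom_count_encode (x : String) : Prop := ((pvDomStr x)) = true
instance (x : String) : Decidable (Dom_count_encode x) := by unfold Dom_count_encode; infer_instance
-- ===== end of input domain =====

-- B replaces A's per-character while loop (with two running accumulators and repeated
-- slicing) by a closed-form arithmetic expression over len(x) and two character counts.

-- ===== PORT A =====
-- A's while loop: consume one character at a time (x = x[1:]), updating both accumulators.
def countEncodeLoop : List Char → Int → Int → List Int
  | [], code_chars, str_chars => [code_chars + 2, str_chars]
  | c :: rest, code_chars, str_chars =>
      countEncodeLoop rest (if c == '"' || c == '\\' then code_chars + 2 else code_chars + 1)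
        (str_chars + 1)

def count_encode (x : String) : List Int := countEncodeLoop x.toList 0 0

-- ===== PORT B =====
def count_encode_alt (x : String) : List Int :=
  [(PySem.Str.len x : Int) + (PySem.Str.count x "\"" : Int) + (PySem.Str.count x "\\" : Int) + 2,
   (PySem.Str.len x : Int)]

-- ===== PRECONDITION & SPEC =====
def Spec_count_encode (x : String) (out : List Int) : Prop := out = count_encode_alt x
instance (x : String) (out : List Int) : Decidable (Spec_count_encode x out) := by unfold Spec_count_encode; infer_instance

-- ===== CLAIM (what is proved, stated in full; the proofs are below) =====
def Claim_equal_count_encode : Prop := ∀ (x : String), Dom_count_encode x → Spec_count_encode x (count_encode x)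

-- ===== LEMMAS AND PROOFS =====

-- Python's s.count(c) for a single character c is the plain character count.
theorem chars_count_go_singleton (q : Char) (l : List Char) (acc fuel : Nat)
    (h : l.length ≤ fuel) :
    PySem.Chars.count.go [q] fuel l acc = acc + l.count q := by
  induction l generalizing acc fuel with
  | nil => cases fuel <;> simp [PySem.Chars.count.go]
  | cons c t ih =>
      cases fuel with
      | zero => simp at h
      | succ n =>
        simp only [List.length_cons, Nat.succ_le_succ_iff] at h
        by_cases hc : c = q
        · subst hc
          simp [PySem.Chars.count.go, List.isPrefixOf, ih _ _ h]
          omega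
        · have : List.isPrefixOf [q] (c :: t) = false := by
            simp [List.isPrefixOf]; exact fun h' => (hc h'.symm).elim
          simp [PySem.Chars.count.go, this, ih _ _ h, hc]

theorem chars_count_singleton (q : Char) (l : List Char) :
    PySem.Chars.count l [q] = l.count q := by
  simp [PySem.Chars.count, chars_count_go_singleton q l 0 l.length le_rfl]

theorem countEncodeLoop_eq (l : List Char) (code str_chars : Int) :
    countEncodeLoop l code str_chars =
      [code + l.length + l.count '"' + l.count '\\' + 2, str_chars + l.length] := by
  induction l generalizing code str_chars with
  | nil => simp [countEncodeLoop]
  | cons c t ih =>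
      by_cases hq : c = '"'
      · subst hq; simp [countEncodeLoop, ih]; constructor <;> ring
      · by_cases hb : c = '\\'
        · subst hb; simp [countEncodeLoop, ih]; constructor <;> ring
        · simp [countEncodeLoop, hq, hb, ih]; constructor <;> ring

-- ===== VERDICT (by name: the statement is the Claim_ definition above) =====
theorem count_encode_spec : Claim_equal_count_encode := by
  intro x _
  unfold Spec_count_encode count_encode count_encode_alt
  simp [countEncodeLoop_eq, PySem.Str.count, PySem.Str.len, chars_count_singleton]
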